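-- pv_equiv track=rewrite | github.com/mxerinda/holbertonschool-Markdown2HTML | markdown2html.py | heading_parse
-- ===== SOURCE A (Python) =====
-- def heading_parse(index, lines_read_list):
--     """heading tags"""
--     count_heading = 0
--     list_heading = []
--     min_level = 1
--     max_level = 6
--
--     while (index < len(lines_read_list)):
--         if lines_read_list[index][0] != '#':
--             break
--
--         data = lines_read_list[index].strip()
--         heading_level = len(data) - len(data.lstrip('#'))
--
--         if min_level <= heading_level <= max_level:
--             string_to_parsing = data.lstrip("#").strip()
--             list_heading.append(f'<h{heading_level}>{string_to_parsing}</h{heading_level}>\n')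
--
--         index += 1
--
--     return (index, list_heading)
-- ===== SOURCE B (Python) =====
-- def _render(block):
--     """Render a block of heading lines to HTML tags by divide and conquer."""
--     if not block:
--         return []
--     if len(block) == 1:
--         data = block[0].strip()
--         level = 0
--         while level < len(data) and data[level] == '#':
--             level += 1
--         if 1 <= level <= 6:
--             return ['<h{}>{}</h{}>\n'.format(level, data[level:].strip(), level)]
--         return []
--     mid = len(block) // 2
--     return _render(block[:mid]) + _render(block[mid:])
--
--
-- def heading_parse(index, lines_read_list):
--     """heading tags: take the maximal '#'-led block of the tail, render it by halving."""
--     tail = lines_read_list[index:]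
--     n = 0
--     while n < len(tail) and tail[n][0] == '#':
--         n += 1
--     return (index + n, _render(tail[:n]))
-- ===== Notes on version B (the rewrite author's own statement) =====
-- stated objective: alternative
-- what changed: A's single interleaved while-loop (cursor arithmetic, conditional append per iteration, level via len minus len(lstrip)) is replaced by: capture the maximal '#'-led block of lines_read_list[index:] with a counting scan, then render that block by divide-and-conquer halving, each base case computing the level with an explicit character scan and the text with a slice.
-- outside the precondition, e.g. on heading_parse(-1, ['# a']): A returns (1, ['<h1>a</h1>\n', '<h1>a</h1>\n']), B returns (0, ['<h1>a</h1>\n'])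
import Mathlib
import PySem

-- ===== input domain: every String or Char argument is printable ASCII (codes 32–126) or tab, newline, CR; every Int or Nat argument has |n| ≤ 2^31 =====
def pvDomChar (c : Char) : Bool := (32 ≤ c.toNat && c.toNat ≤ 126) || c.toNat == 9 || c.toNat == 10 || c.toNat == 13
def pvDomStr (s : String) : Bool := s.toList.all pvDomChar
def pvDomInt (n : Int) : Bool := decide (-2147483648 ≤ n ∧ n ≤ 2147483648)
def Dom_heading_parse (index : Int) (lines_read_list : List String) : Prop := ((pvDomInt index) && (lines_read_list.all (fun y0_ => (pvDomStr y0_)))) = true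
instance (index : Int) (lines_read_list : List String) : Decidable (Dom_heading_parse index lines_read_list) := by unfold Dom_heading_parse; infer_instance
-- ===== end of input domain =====

-- B replaces A's single interleaved while-loop by a counting scan that captures the maximal
-- '#'-led block of the tail slice, followed by a divide-and-conquer rendering of that block;
-- an alternative decomposition of the same cost, equal return values on Pre_.

-- ===== PORT A =====
-- Python's s.lstrip('#') has no PySem primitive; dropping the leading '#' characters by hand is exact.
def pvLstripHash (s : String) : String := String.ofList (s.toList.dropWhile (fun c => c == '#'))

def headingLoopA (lines_read_list : List String) (index : Int) (list_heading : List String) :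
    Int × List String :=
  if _h : index < (lines_read_list.length : Int) then
    match PySem.List.pyGet? lines_read_list index with
    | none => (index, list_heading)   -- IndexError (index < -len): excluded by Pre_
    | some line =>
      match PySem.Str.pyGet? line 0 with
      | none => (index, list_heading) -- IndexError on an empty line: excluded by Pre_
      | some c =>
        if c ≠ '#' then (index, list_heading)
        else
          let data := PySem.Str.strip line
          let heading_level : Int := PySem.Str.len data - PySem.Str.len (pvLstripHash data)
          let list_heading' :=
            if 1 ≤ heading_level ∧ heading_level ≤ 6 then
              list_heading ++ ["<h" ++ PySem.Int.toStr heading_level ++ ">" ++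
                PySem.Str.strip (pvLstripHash data) ++ "</h" ++ PySem.Int.toStr heading_level ++ ">\n"]
            else list_heading
          headingLoopA lines_read_list (index + 1) list_heading'
  else (index, list_heading)
termination_by ((lines_read_list.length : Int) - index).toNat
decreasing_by omega

def heading_parse (index : Int) (lines_read_list : List String) : Int × List String :=
  headingLoopA lines_read_list index []

-- ===== PORT B =====
-- Source B's explicit "while level < len(data) and data[level] == '#'" counting loop
def pvLevel : List Char → Nat
  | [] => 0
  | c :: rest => if c = '#' then pvLevel rest + 1 else 0

-- Source B's _render: divide-and-conquer over the captured block
def pvRender (block : List String) : List String :=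
  if block = [] then []
  else if block.length = 1 then
    let data := PySem.Str.strip (PySem.List.pyGetD block 0 "")
    let level := pvLevel data.toList
    if 1 ≤ level ∧ level ≤ 6 then
      ["<h" ++ PySem.Int.toStr level ++ ">" ++
        PySem.Str.strip (String.ofList (data.toList.drop level)) ++
        "</h" ++ PySem.Int.toStr level ++ ">\n"]
    else []
  else
    let mid := block.length / 2
    pvRender (PySem.List.slice block none (some (mid : Int))) ++
      pvRender (PySem.List.slice block (some (mid : Int)) none)
termination_by block.length
decreasing_by
  · rename_i h0 h1
    rw [PySem.List.slice_to_natCast]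
    have h2 : block.length ≠ 0 := by simpa using h0
    simp only [List.length_take]
    omega
  · rename_i h0 h1
    rw [PySem.List.slice_from_natCast]
    have h2 : block.length ≠ 0 := by simpa using h0
    simp only [List.length_drop]
    omega

-- Source B's counting while-loop over tail, as structural recursion
def pvCountB : List String → Nat
  | [] => 0
  | line :: rest =>
    match PySem.Str.pyGet? line 0 with
    | some c => if c = '#' then pvCountB rest + 1 else 0
    | none => 0          -- IndexError on an empty line: excluded by Pre_

def heading_parse_alt (index : Int) (lines_read_list : List String) : Int × List String :=
  let tail := PySem.List.slice lines_read_list (some index) none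
  let n := pvCountB tail
  (index + (n : Int), pvRender (PySem.List.slice tail none (some (n : Int))))

-- ===== PRECONDITION & SPEC =====
-- Pre_ restricts to the natural domain 0 ≤ index (for a negative cursor A's wraparound rescans
-- lines twice, which B's slice does not mimic) and excludes the inputs where A raises IndexError,
-- i.e. those whose maximal '#'-led block from index is terminated by an empty line.
def Pre_heading_parse (index : Int) (lines_read_list : List String) : Prop :=
  0 ≤ index ∧
  ((((lines_read_list.drop index.toNat).dropWhile
      (fun l => l.toList.head? == some '#')).head?.map
      (fun s => !s.toList.isEmpty)).getD true) = true
instance (index : Int) (lines_read_list : List String) : Decidable (Pre_heading_parse index lines_read_list) := by unfold Pre_heading_parse; infer_instance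

def pvWitness_heading_parse : Int × List String := (0, [])

def Spec_heading_parse (index : Int) (lines_read_list : List String) (out : Int × List String) : Prop := out = heading_parse_alt index lines_read_list
instance (index : Int) (lines_read_list : List String) (out : Int × List String) : Decidable (Spec_heading_parse index lines_read_list out) := by unfold Spec_heading_parse; infer_instance

-- ===== CLAIM (what is proved, stated in full; the proofs are below) =====
def Claim_equal_heading_parse : Prop := ∀ (index : Int) (lines_read_list : List String), Dom_heading_parse index lines_read_list → Pre_heading_parse index lines_read_list → Spec_heading_parse index lines_read_list (heading_parse index lines_read_list)

-- ===== LEMMAS AND PROOFS =====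

-- the tag of one heading line, shared shape of both programs' per-line work (proof helper only)
def pvTag (line : String) : Option String :=
  let data := PySem.Str.strip line
  let level := pvLevel data.toList
  if 1 ≤ level ∧ level ≤ 6 then
    some ("<h" ++ PySem.Int.toStr level ++ ">" ++
      PySem.Str.strip (String.ofList (data.toList.drop level)) ++
      "</h" ++ PySem.Int.toStr level ++ ">\n")
  else none

lemma pvLevel_le (l : List Char) : pvLevel l ≤ l.length := by
  induction l with
  | nil => simp [pvLevel]
  | cons c rest ih => simp [pvLevel]; split_ifs <;> omega

lemma pvDropWhile_eq_drop_level (l : List Char) :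
    l.dropWhile (fun c => c == '#') = l.drop (pvLevel l) := by
  induction l with
  | nil => simp [pvLevel]
  | cons c rest ih =>
    by_cases hc : c = '#'
    · subst hc; simpa [pvLevel] using ih
    · simp [pvLevel, hc]

lemma pvRender_base (x : String) :
    pvRender [x] = (pvTag x).toList := by
  rw [pvRender, if_neg (by simp), if_pos (by simp)]
  simp only [pvTag, PySem.List.pyGetD_zero_cons]
  split_ifs <;> simp

lemma pvRender_eq_filterMap (block : List String) :
    pvRender block = block.filterMap pvTag := by
  induction block using pvRender.induct with
  | case1 => simp [pvRender]
  | case2 x h0 h1 _ =>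
    obtain ⟨a, rfl⟩ := List.length_eq_one_iff.mp h1
    rw [pvRender_base]
    cases htag : pvTag a <;> simp [htag]
  | case3 x h0 h1 _ =>
    obtain ⟨a, rfl⟩ := List.length_eq_one_iff.mp h1
    rw [pvRender_base]
    cases htag : pvTag a <;> simp [htag]
  | case4 x h0 h1 mid ih1 ih2 =>
    rw [pvRender]
    simp only [if_neg h0, if_neg h1]
    rw [PySem.List.slice_to_natCast] at ih1 ⊢
    rw [PySem.List.slice_from_natCast] at ih2 ⊢
    rw [ih1, ih2, ← List.filterMap_append, List.take_append_drop]

-- A's per-line arithmetic (len minus len(lstrip('#')), lstrip text) computes pvTag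
lemma pvTag_spec (x : String) :
    pvTag x =
      (let data := PySem.Str.strip x
       let heading_level : Int := PySem.Str.len data - PySem.Str.len (pvLstripHash data)
       if 1 ≤ heading_level ∧ heading_level ≤ 6 then
         some ("<h" ++ PySem.Int.toStr heading_level ++ ">" ++
           PySem.Str.strip (pvLstripHash data) ++ "</h" ++ PySem.Int.toStr heading_level ++ ">\n")
       else none) := by
  have hdw := pvDropWhile_eq_drop_level (PySem.Str.strip x).toList
  have hle := pvLevel_le (PySem.Str.strip x).toList
  unfold pvTag pvLstripHash
  simp only []
  rw [hdw]
  have hL : PySem.Str.len (PySem.Str.strip x) -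
      PySem.Str.len (String.ofList
        ((PySem.Str.strip x).toList.drop (pvLevel (PySem.Str.strip x).toList))) =
      ((pvLevel (PySem.Str.strip x).toList : Int)) := by
    simp only [PySem.Str.len_eq, String.toList_ofList, List.length_drop]
    omega
  simp only [hL]
  by_cases hcond : 1 ≤ pvLevel (PySem.Str.strip x).toList ∧ pvLevel (PySem.Str.strip x).toList ≤ 6
  · rw [if_pos hcond, if_pos (by omega)]
  · rw [if_neg hcond, if_neg (by omega)]

set_option maxHeartbeats 2000000 in
lemma pvLoopA_eq (lines : List String) :
    ∀ (t : List String) (i : Int) (acc : List String),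
      0 ≤ i → lines.drop i.toNat = t →
      (((t.dropWhile (fun l => l.toList.head? == some '#')).head?.map
          (fun s => !s.toList.isEmpty)).getD true) = true →
      headingLoopA lines i acc =
        (i + (pvCountB t : Int), acc ++ (t.take (pvCountB t)).filterMap pvTag) := by
  intro t
  induction t with
  | nil =>
      intro i acc h0 hdrop _
      have hlen : lines.length ≤ i.toNat := by
        simpa using (List.drop_eq_nil_iff).mp hdrop
      rw [headingLoopA]
      rw [dif_neg (by omega)]
      simp [pvCountB]
  | cons x rest ih =>
      intro i acc h0 hdrop hpre
      have hlt : i < (lines.length : Int) := by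
        have := congrArg List.length hdrop
        simp at this
        omega
      have hget : PySem.List.pyGet? lines i = some x := by
        rw [PySem.List.pyGet?_of_nonneg lines h0, ← List.head?_drop, hdrop]
        rfl
      have hx0 : PySem.Str.pyGet? x 0 = x.toList.head? := by
        simp [PySem.List.pyGet?_zero, List.head?_eq_getElem?]
      have hrest : lines.drop (i + 1).toNat = rest := by
        have h1 : (i + 1).toNat = i.toNat + 1 := by omega
        rw [h1, ← List.drop_drop, hdrop]
        rfl
      rw [headingLoopA, dif_pos hlt, hget]
      cases hhead : x.toList.head? with
      | none =>
          exfalso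
          have hnil : x.toList = [] := List.head?_eq_none_iff.mp hhead
          rw [List.dropWhile_cons_of_neg (by simp [hhead])] at hpre
          simp [hnil] at hpre
      | some c =>
          by_cases hc : c = '#'
          · subst hc
            rw [List.dropWhile_cons_of_pos (by simp [hhead])] at hpre
            have hcount : pvCountB (x :: rest) = pvCountB rest + 1 := by
              simp only [pvCountB, hx0, hhead]
              simp
            simp only [hx0, hhead, ne_eq, not_true_eq_false, ite_false]
            rw [ih (i + 1) _ (by omega) hrest hpre]
            rw [hcount]
            refine Prod.ext ?_ ?_
            · push_cast
              omega
            · show _ ++ _ = acc ++ (List.take (pvCountB rest + 1) (x :: rest)).filterMap pvTag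
              rw [List.take_succ_cons, List.filterMap_cons, pvTag_spec x]
              simp only
              split_ifs with hlv
              · simp only [List.append_assoc, List.singleton_append]
              · rfl
          · have hcount : pvCountB (x :: rest) = 0 := by
              simp only [pvCountB, hx0, hhead]
              simp [hc]
            simp only [hx0, hhead]
            rw [hcount]
            simp [hc]

-- ===== VERDICT (by name: the statement is the Claim_ definition above) =====
theorem heading_parse_spec : Claim_equal_heading_parse := by
  intro index lines _dom hpre
  obtain ⟨h0, hp⟩ := hpre
  show heading_parse index lines = heading_parse_alt index lines
  unfold heading_parse heading_parse_alt
  simp only [PySem.List.slice_from lines h0, PySem.List.slice_to_natCast]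
  rw [pvRender_eq_filterMap]
  rw [pvLoopA_eq lines (lines.drop index.toNat) index [] h0 rfl hp]
  simp
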